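-- pv_equiv track=rewrite | github.com/981377660LMT/algorithm-study | 2_queue/单调队列Monoqueue/二维滑动窗口最小值.py | solve
-- ===== SOURCE A (Python) =====
-- from collections import deque
-- from typing import List
--
-- class MonoQueue:
--     __slots__ = ("maxQueue", "minQueue", "rawQueue")
--
--     def __init__(self):
--         self.maxQueue = deque()
--         self.minQueue = deque()
--         self.rawQueue = deque()
--
--     @property
--     def min(self) -> int:
--         return self.minQueue[0][0]
--
--     @property
--     def max(self) -> int:
--         return self.maxQueue[0][0]
--
--     def popleft(self) -> int:
--         if not self.rawQueue:
--             raise IndexError("popleft from empty queue")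
--
--         self.minQueue[0][1] -= 1
--         if self.minQueue[0][1] == 0:
--             self.minQueue.popleft()
--
--         self.maxQueue[0][1] -= 1
--         if self.maxQueue[0][1] == 0:
--             self.maxQueue.popleft()
--
--         return self.rawQueue.popleft()
--
--     def append(self, value: int) -> None:
--         count = 1
--         while self.minQueue and self.minQueue[-1][0] > value:
--             count += self.minQueue.pop()[1]
--         self.minQueue.append([value, count])
--
--         count = 1
--         while self.maxQueue and self.maxQueue[-1][0] < value:
--             count += self.maxQueue.pop()[1]
--         self.maxQueue.append([value, count])
--
--         self.rawQueue.append(value)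
--
--     def __len__(self) -> int:
--         return len(self.rawQueue)
--
-- def solve(matrix: List[List[int]], rowSize: int, colSize: int) -> List[List[int]]:
--     """有一个整数组成的矩阵，现请你从中找出一个 rowSize*colSize 的区域，使得该区域所有数中的最大值和最小值的差最小"""
--     row, col = len(matrix), len(matrix[0])
--     cols = [MonoQueue() for _ in range(col)]
--     for r in range(rowSize):
--         for c, v in enumerate(matrix[r]):
--             cols[c].append(v)
--
--     res = []
--     for r in range(row - rowSize + 1):
--         # 维护每行的滑动窗口最小值
--         window1, window2 = MonoQueue(), MonoQueue()
--         for c in range(col):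
--             # 每列的最小/大值
--             window1.append((cols[c].min))
--             window2.append((cols[c].max))
--             if c >= colSize - 1:
--                 res.append((window1.min, window2.max))
--                 window1.popleft()
--                 window2.popleft()
--
--         if r + rowSize < row:
--             for c in range(col):
--                 cols[c].append(matrix[r + rowSize][c])
--                 cols[c].popleft()
--
--     return min((y - x) for x, y in res)
-- ===== SOURCE B (Python) =====
-- def solve(matrix, rowSize, colSize):
--     row, col = len(matrix), len(matrix[0])
--     diffs = []
--     for r in range(row - rowSize + 1):
--         for c in range(col - colSize + 1):
--             window = [matrix[r + i][c + j] for i in range(rowSize) for j in range(colSize)]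
--             diffs.append(max(window) - min(window))
--     return min(diffs)
-- ===== Notes on version B (the rewrite author's own statement) =====
-- stated objective: simpler
-- what changed: Replaces the three-deque MonoQueue sliding-window machinery with a direct brute-force scan: for each top-left corner take max-min of the rowSize x colSize submatrix and return the smallest difference.
-- outside the precondition, e.g. on solve([[1, 2]], 1, 0): A returns 0, B raises ValueError; on solve([[1, 2], [3]], 2, 1): A returns 0, B raises IndexError
import Mathlib
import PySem

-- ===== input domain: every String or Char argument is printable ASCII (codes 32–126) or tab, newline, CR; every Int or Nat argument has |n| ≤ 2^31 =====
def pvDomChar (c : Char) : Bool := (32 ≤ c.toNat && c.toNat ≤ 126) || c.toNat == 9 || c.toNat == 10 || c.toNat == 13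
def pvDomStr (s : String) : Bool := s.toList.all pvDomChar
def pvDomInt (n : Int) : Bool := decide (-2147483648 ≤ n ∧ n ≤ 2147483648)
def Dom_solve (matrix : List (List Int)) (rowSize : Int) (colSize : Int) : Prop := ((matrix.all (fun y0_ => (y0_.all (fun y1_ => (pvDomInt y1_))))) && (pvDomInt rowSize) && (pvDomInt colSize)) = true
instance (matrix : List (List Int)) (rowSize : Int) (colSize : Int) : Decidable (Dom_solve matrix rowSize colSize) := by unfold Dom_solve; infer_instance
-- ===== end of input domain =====

-- B drops the three-deque MonoQueue machinery for a plain brute-force scan of every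
-- rowSize×colSize window (objective: simpler; B is slower asymptotically, not faster).

-- ===== PORT A =====
-- MonoQueue: maxQueue/minQueue hold (value, count) runs, rawQueue the window contents.
structure MQ where
  maxQ : List (Int × Int)
  minQ : List (Int × Int)
  raw  : List Int
deriving Repr

def MQ.empty : MQ := ⟨[], [], []⟩

-- the `while queue and queue[-1] beats value: pop` loop of MonoQueue.append, acting on the
-- REVERSED run list (most recent entry first); `bt v a` = new value v evicts old entry a
def pushRun (bt : Int → Int → Bool) (v : Int) : List (Int × Int) → Int → List (Int × Int)
  | [], c => [(v, c)]
  | (a, k) :: rest, c => if bt v a then pushRun bt v rest (c + k) else (v, c) :: (a, k) :: rest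

def btMin (v a : Int) : Bool := decide (v < a)  -- minQueue pops while `last > value`
def btMax (v a : Int) : Bool := decide (a < v)  -- maxQueue pops while `last < value`

def MQ.append (q : MQ) (v : Int) : MQ :=
  { minQ := (pushRun btMin v q.minQ.reverse 1).reverse
    maxQ := (pushRun btMax v q.maxQ.reverse 1).reverse
    raw := q.raw ++ [v] }

-- `queue[0][1] -= 1; if queue[0][1] == 0: queue.popleft()`
def decHead : List (Int × Int) → List (Int × Int)
  | [] => []
  | (a, k) :: rest => if k - 1 = 0 then rest else (a, k - 1) :: rest

-- popleft on empty rawQueue raises IndexError in Python; under Pre_ it is never reached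
def MQ.popleft (q : MQ) : MQ := { minQ := decHead q.minQ, maxQ := decHead q.maxQ, raw := q.raw.tail }

-- `self.minQueue[0][0]` / `self.maxQueue[0][0]`: IndexError on an empty queue (excluded by Pre_)
def MQ.minv (q : MQ) : Int := (q.minQ.headD (0, 0)).1
def MQ.maxv (q : MQ) : Int := (q.maxQ.headD (0, 0)).1

def solve (matrix : List (List Int)) (rowSize : Int) (colSize : Int) : Int :=
  let row : Int := matrix.length
  let col : Int := (matrix.headD []).length  -- matrix[0]: IndexError on [] is excluded by Pre_
  let cols0 : List MQ := List.replicate (matrix.headD []).length MQ.empty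
  let cols1 := (PySem.List.pyRange 0 rowSize 1).foldl (fun cs r =>
      (PySem.List.enumerate (PySem.List.pyGetD matrix r []) 0).foldl
        (fun cs2 cv => PySem.List.pySetD cs2 cv.1 ((PySem.List.pyGetD cs2 cv.1 MQ.empty).append cv.2)) cs) cols0
  let st := (PySem.List.pyRange 0 (row - rowSize + 1) 1).foldl (fun (st : List MQ × List (Int × Int)) r =>
      let inner := (PySem.List.pyRange 0 col 1).foldl (fun (s : MQ × MQ × List (Int × Int)) c =>
          let w1 := s.1.append (PySem.List.pyGetD st.1 c MQ.empty).minv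
          let w2 := s.2.1.append (PySem.List.pyGetD st.1 c MQ.empty).maxv
          if colSize - 1 ≤ c then
            (w1.popleft, w2.popleft, s.2.2 ++ [(w1.minv, w2.maxv)])
          else (w1, w2, s.2.2)) (MQ.empty, MQ.empty, st.2)
      let cols2 := if r + rowSize < row then
          (PySem.List.pyRange 0 col 1).foldl (fun cs c =>
            PySem.List.pySetD cs c
              (((PySem.List.pyGetD cs c MQ.empty).append
                  (PySem.List.pyGetD (PySem.List.pyGetD matrix (r + rowSize) []) c 0)).popleft)) st.1
        else st.1
      (cols2, inner.2.2)) (cols1, [])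
  match st.2 with
  | [] => 0  -- min() of an empty sequence raises ValueError; excluded by Pre_
  | p :: ps => ps.foldl (fun m q => min m (q.2 - q.1)) (p.2 - p.1)

-- ===== PORT B =====
def solve_alt (matrix : List (List Int)) (rowSize : Int) (colSize : Int) : Int :=
  let row : Int := matrix.length
  let col : Int := (matrix.headD []).length
  let diffs := (PySem.List.pyRange 0 (row - rowSize + 1) 1).foldl (fun acc r =>
      (PySem.List.pyRange 0 (col - colSize + 1) 1).foldl (fun acc2 c =>
        let window := (PySem.List.pyRange 0 rowSize 1).flatMap (fun i =>
            (PySem.List.pyRange 0 colSize 1).map (fun j =>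
              PySem.List.pyGetD (PySem.List.pyGetD matrix (r + i) []) (c + j) 0))
        acc2 ++ [(PySem.List.max? window (fun y => y)).getD 0
                 - (PySem.List.min? window (fun y => y)).getD 0]) acc) []
  (PySem.List.min? diffs (fun y => y)).getD 0  -- min() of empty diffs: ValueError, excluded by Pre_

-- ===== PRECONDITION & SPEC =====
-- Pre_ excludes inputs on which A raises (empty matrix, rowSize outside [1,rows],
-- colSize > cols, ragged rows that A reads out of range) and two corners where A still
-- returns a value that is an accident of its window bookkeeping: colSize ≤ 0 (A treats any
-- non-positive width exactly like width 1) and ragged matrices whose short rows A silently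
-- mixes into the wrong column windows.
def Pre_solve (matrix : List (List Int)) (rowSize : Int) (colSize : Int) : Prop :=
  matrix ≠ [] ∧ (∀ r ∈ matrix, r.length = (matrix.headD []).length) ∧
  1 ≤ rowSize ∧ rowSize ≤ (matrix.length : Int) ∧
  1 ≤ colSize ∧ colSize ≤ ((matrix.headD []).length : Int)
instance (matrix : List (List Int)) (rowSize : Int) (colSize : Int) : Decidable (Pre_solve matrix rowSize colSize) := by unfold Pre_solve; infer_instance

def pvWitness_solve : List (List Int) × Int × Int := ([[1, 2], [3, 4]], 1, 2)

def Spec_solve (matrix : List (List Int)) (rowSize : Int) (colSize : Int) (out : Int) : Prop := out = solve_alt matrix rowSize colSize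
instance (matrix : List (List Int)) (rowSize : Int) (colSize : Int) (out : Int) : Decidable (Spec_solve matrix rowSize colSize out) := by unfold Spec_solve; infer_instance

-- ===== CLAIM (what is proved, stated in full; the proofs are below) =====
def Claim_equal_solve : Prop := ∀ (matrix : List (List Int)) (rowSize : Int) (colSize : Int), Dom_solve matrix rowSize colSize → Pre_solve matrix rowSize colSize → Spec_solve matrix rowSize colSize (solve matrix rowSize colSize)

-- ===== LEMMAS AND PROOFS =====

-- ---- run-list machinery (abstract in the eviction test bt) ----

def Qrun (bt : Int → Int → Bool) (w : List Int) : List (Int × Int) :=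
  w.foldl (fun l x => (pushRun bt x l.reverse 1).reverse) []

def bump : List (Int × Int) → List (Int × Int)
  | [] => []
  | (a, k) :: t => (a, k + 1) :: t

def sumC (l : List (Int × Int)) : Int := (l.map (·.2)).sum

theorem sumC_reverse (l : List (Int × Int)) : sumC l.reverse = sumC l := by
  simp [sumC]

theorem pushRun_ne_nil (bt : Int → Int → Bool) (v : Int) :
    ∀ (rq : List (Int × Int)) (c : Int), pushRun bt v rq c ≠ [] := by
  intro rq
  induction rq with
  | nil => intro c; simp [pushRun]
  | cons p rest ih =>
    intro c
    obtain ⟨a, k⟩ := p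
    simp only [pushRun]
    split
    · exact ih (c + k)
    · simp

theorem pushRun_all_evict (bt : Int → Int → Bool) (v : Int) :
    ∀ (rq : List (Int × Int)) (c : Int), (∀ p ∈ rq, bt v p.1 = true) →
    pushRun bt v rq c = [(v, c + sumC rq)] := by
  intro rq
  induction rq with
  | nil => intro c _; simp [pushRun, sumC]
  | cons p rest ih =>
    intro c h
    obtain ⟨a, k⟩ := p
    have ha : bt v a = true := h (a, k) (by simp)
    simp only [pushRun, ha, if_pos]
    rw [ih (c + k) (fun p hp => h p (by simp [hp]))]
    simp [sumC]; ring

theorem pushRun_stop (bt : Int → Int → Bool) (v x k : Int) (hvx : bt v x = false) :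
    ∀ (rq : List (Int × Int)) (c : Int),
    pushRun bt v (rq ++ [(x, k)]) c = pushRun bt v rq c ++ [(x, k)] := by
  intro rq
  induction rq with
  | nil => intro c; simp [pushRun, hvx]
  | cons p rest ih =>
    intro c
    obtain ⟨a, b⟩ := p
    simp only [List.cons_append, pushRun]
    split
    · exact ih (c + b)
    · simp

def RInv (bt : Int → Int → Bool) (rq : List (Int × Int)) : Prop :=
  (∀ p ∈ rq, 1 ≤ p.2) ∧ (rq.map (·.1)).Pairwise (fun b a => bt b a = false)

theorem pushRun_RInv (bt : Int → Int → Bool)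
    (H2 : ∀ v a b, bt v a = false → bt a b = false → bt v b = false) (v : Int) :
    ∀ (rq : List (Int × Int)) (c : Int), RInv bt rq → 1 ≤ c → RInv bt (pushRun bt v rq c) := by
  intro rq
  induction rq with
  | nil =>
    intro c _ hc
    exact ⟨by simpa [pushRun] using hc, by simp [pushRun]⟩
  | cons p rest ih =>
    intro c hinv hc
    obtain ⟨a, k⟩ := p
    have hk : (1:Int) ≤ k := hinv.1 (a, k) (by simp)
    have hpw : (List.map (·.1) ((a,k) :: rest)).Pairwise (fun b a => bt b a = false) := hinv.2
    simp only [List.map_cons] at hpw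
    have hpc := List.pairwise_cons.mp hpw
    have hrest : RInv bt rest := ⟨fun p hp => hinv.1 p (by simp [hp]), hpc.2⟩
    simp only [pushRun]
    split
    · exact ih (c + k) hrest (by omega)
    · rename_i hva
      have hva' : bt v a = false := by simpa using hva
      refine ⟨?_, ?_⟩
      · intro p hp
        rcases List.mem_cons.mp hp with rfl | hp
        · exact hc
        rcases List.mem_cons.mp hp with rfl | hp
        · exact hk
        · exact hinv.1 p (List.mem_cons_of_mem _ hp)
      · simp only [List.map_cons]
        refine List.pairwise_cons.mpr ⟨?_, hpw⟩
        intro b hb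
        rcases List.mem_cons.mp hb with rfl | hb
        · exact hva'
        · rcases List.mem_map.mp hb with ⟨q, hq, rfl⟩
          exact H2 v a q.1 hva' (hpc.1 q.1 (List.mem_map.mpr ⟨q, hq, rfl⟩))

theorem Qrun_snoc (bt : Int → Int → Bool) (w : List Int) (v : Int) :
    Qrun bt (w ++ [v]) = (pushRun bt v (Qrun bt w).reverse 1).reverse := by
  simp [Qrun]

theorem Qrun_ne_nil (bt : Int → Int → Bool) (w : List Int) (hw : w ≠ []) : Qrun bt w ≠ [] := by
  induction w using List.reverseRecOn with
  | nil => exact absurd rfl hw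
  | append_singleton ys v _ =>
    rw [Qrun_snoc]
    simpa using pushRun_ne_nil bt v (Qrun bt ys).reverse 1

theorem Qrun_rinv (bt : Int → Int → Bool)
    (H2 : ∀ v a b, bt v a = false → bt a b = false → bt v b = false) (w : List Int) :
    RInv bt (Qrun bt w).reverse := by
  induction w using List.reverseRecOn with
  | nil => exact ⟨by simp [Qrun], by simp [Qrun]⟩
  | append_singleton ys v ih =>
    rw [Qrun_snoc, List.reverse_reverse]
    exact pushRun_RInv bt H2 v _ 1 ih (by omega)

theorem Qrun_counts (bt : Int → Int → Bool)
    (H2 : ∀ v a b, bt v a = false → bt a b = false → bt v b = false) (w : List Int) :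
    ∀ p ∈ Qrun bt w, 1 ≤ p.2 := by
  intro p hp
  exact (Qrun_rinv bt H2 w).1 p (by simpa using hp)

-- front order: an earlier entry is never evicted by a later one
theorem Qrun_pairwise (bt : Int → Int → Bool)
    (H2 : ∀ v a b, bt v a = false → bt a b = false → bt v b = false) (w : List Int) :
    ((Qrun bt w).map (·.1)).Pairwise (fun a b => bt b a = false) := by
  have h := (Qrun_rinv bt H2 w).2
  rw [List.map_reverse, List.pairwise_reverse] at h
  exact h

theorem pushRun_fst_sub (bt : Int → Int → Bool) (v : Int) :
    ∀ (rq : List (Int × Int)) (c : Int), ∀ p ∈ pushRun bt v rq c, p.1 = v ∨ p ∈ rq := by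
  intro rq
  induction rq with
  | nil => intro c p hp; simp [pushRun] at hp; simp [hp]
  | cons q rest ih =>
    intro c p hp
    obtain ⟨a, k⟩ := q
    simp only [pushRun] at hp
    split at hp
    · rcases ih (c + k) p hp with h | h
      · exact Or.inl h
      · exact Or.inr (List.mem_cons_of_mem _ h)
    · rcases List.mem_cons.mp hp with rfl | h
      · exact Or.inl rfl
      · exact Or.inr h

theorem Qrun_fst_mem (bt : Int → Int → Bool) :
    ∀ (w : List Int), ∀ p ∈ Qrun bt w, p.1 ∈ w := by
  intro w
  induction w using List.reverseRecOn with
  | nil => intro p hp; simp [Qrun] at hp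
  | append_singleton ys v ih =>
    intro p hp
    rw [Qrun_snoc, List.mem_reverse] at hp
    rcases pushRun_fst_sub bt v _ 1 p hp with h | h
    · simp [h]
    · exact List.mem_append_left _ (ih p (by simpa using h))

theorem Qrun_cons (bt : Int → Int → Bool)
    (H1 : ∀ v x a, bt v x = true → bt a x = false → bt v a = true)
    (H2 : ∀ v a b, bt v a = false → bt a b = false → bt v b = false) :
    ∀ (w : List Int) (x : Int),
    Qrun bt (x :: w) =
      if ∀ y ∈ w, bt y x = false then (x, 1) :: Qrun bt w else bump (Qrun bt w) := by
  intro w x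
  induction w using List.reverseRecOn with
  | nil => simp [Qrun, pushRun]
  | append_singleton ys v ih =>
    have e1 : x :: (ys ++ [v]) = (x :: ys) ++ [v] := rfl
    rw [e1, Qrun_snoc, Qrun_snoc bt ys v, ih]
    by_cases hcond : ∀ y ∈ ys, bt y x = false
    · rw [if_pos hcond]
      by_cases hvx : bt v x = false
      · rw [if_pos (by intro y hy; rcases List.mem_append.mp hy with h | h
                       · exact hcond y h
                       · simp at h; simpa [h] using hvx)]
        rw [List.reverse_cons, pushRun_stop bt v x 1 hvx]
        simp
      · have hvx' : bt v x = true := by simpa using hvx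
        rw [if_neg (by intro hall; have := hall v (by simp); simp [hvx'] at this)]
        have hmemy : ∀ p ∈ (Qrun bt ys).reverse, bt v p.1 = true := by
          intro p hp
          rw [List.mem_reverse] at hp
          exact H1 v x p.1 hvx' (hcond p.1 (Qrun_fst_mem bt ys p hp))
        have hall1 : ∀ p ∈ ((x, 1) :: Qrun bt ys).reverse, bt v p.1 = true := by
          intro p hp
          rw [List.mem_reverse] at hp
          rcases List.mem_cons.mp hp with rfl | hp
          · exact hvx'
          · exact hmemy p (by simpa using hp)
        rw [pushRun_all_evict bt v _ 1 hall1, pushRun_all_evict bt v _ 1 hmemy]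
        have h1 : sumC ((x, 1) :: Qrun bt ys).reverse = 1 + sumC (Qrun bt ys) := by
          rw [sumC_reverse]; simp [sumC]
        have h2 : sumC (Qrun bt ys).reverse = sumC (Qrun bt ys) := sumC_reverse _
        rw [h1, h2]
        simp only [bump, List.reverse_cons, List.reverse_nil, List.nil_append]
        ring_nf
    · rw [if_neg hcond]
      rw [if_neg (by intro hall; exact hcond (fun y hy => hall y (List.mem_append_left _ hy)))]
      have hys : ys ≠ [] := by rintro rfl; exact hcond (by simp)
      obtain ⟨a, k, t, hQ⟩ : ∃ a k t, Qrun bt ys = (a, k) :: t := by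
        cases h : Qrun bt ys with
        | nil => exact absurd h (Qrun_ne_nil bt ys hys)
        | cons p t => exact ⟨p.1, p.2, t, by cases p; simp_all⟩
      have hpw := Qrun_pairwise bt H2 ys
      rw [hQ] at hpw
      simp only [List.map_cons] at hpw
      have hta : ∀ b ∈ t.map (·.1), bt b a = false := (List.pairwise_cons.mp hpw).1
      rw [hQ]
      simp only [bump]
      by_cases hva : bt v a = false
      · rw [List.reverse_cons, List.reverse_cons, pushRun_stop bt v a (k+1) hva,
            pushRun_stop bt v a k hva]
        simp
      · have hva' : bt v a = true := by simpa using hva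
        have hevt : ∀ p ∈ t.reverse, bt v p.1 = true := by
          intro p hp
          rw [List.mem_reverse] at hp
          exact H1 v a p.1 hva' (hta p.1 (List.mem_map.mpr ⟨p, hp, rfl⟩))
        have hev1 : ∀ p ∈ ((a, k+1) :: t).reverse, bt v p.1 = true := by
          intro p hp
          rw [List.mem_reverse] at hp
          rcases List.mem_cons.mp hp with rfl | hp
          · exact hva'
          · exact hevt p (by simpa using hp)
        have hev2 : ∀ p ∈ ((a, k) :: t).reverse, bt v p.1 = true := by
          intro p hp
          rw [List.mem_reverse] at hp
          rcases List.mem_cons.mp hp with rfl | hp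
          · exact hva'
          · exact hevt p (by simpa using hp)
        rw [pushRun_all_evict bt v _ 1 hev1, pushRun_all_evict bt v _ 1 hev2]
        have h1 : sumC ((a, k+1) :: t).reverse = sumC t + (k + 1) := by
          rw [sumC_reverse]; simp [sumC]; ring
        have h2 : sumC ((a, k) :: t).reverse = sumC t + k := by
          rw [sumC_reverse]; simp [sumC]; ring
        rw [h1, h2]
        simp
        ring

theorem foldl_pick_id (bt : Int → Int → Bool) :
    ∀ (w : List Int) (x : Int), (∀ y ∈ w, bt y x = false) →
    w.foldl (fun cur y => if bt y cur then y else cur) x = x := by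
  intro w
  induction w with
  | nil => intro x _; rfl
  | cons y ys ih =>
    intro x h
    have hy : bt y x = false := h y (by simp)
    simp only [List.foldl_cons, hy, Bool.false_eq_true, if_false]
    exact ih x (fun z hz => h z (by simp [hz]))

def bestPick (bt : Int → Int → Bool) : List Int → Int
  | [] => 0
  | y :: ys => ys.foldl (fun cur z => if bt z cur then z else cur) y

theorem foldl_pick_switch (bt : Int → Int → Bool)
    (H1 : ∀ v x a, bt v x = true → bt a x = false → bt v a = true) :
    ∀ (xs : List Int) (x : Int), (∃ z ∈ xs, bt z x = true) →
    xs.foldl (fun cur y => if bt y cur then y else cur) x = bestPick bt xs := by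
  intro xs
  induction xs with
  | nil => intro x h; simp at h
  | cons y ys ih =>
    intro x ⟨z, hz, hbt⟩
    simp only [List.foldl_cons, bestPick]
    by_cases hyx : bt y x = true
    · rw [if_pos hyx]
    · have hyx' : bt y x = false := by simpa using hyx
      rw [if_neg (by simp [hyx'])]
      have hzys : z ∈ ys := by
        rcases List.mem_cons.mp hz with rfl | h
        · rw [hbt] at hyx'; cases hyx'
        · exact h
      have h1 := ih x ⟨z, hzys, hbt⟩
      have h2 := ih y ⟨z, hzys, H1 z x y hbt hyx'⟩
      rw [h1, ← h2]

theorem bump_headD_fst (l : List (Int × Int)) :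
    ((bump l).headD (0, 0)).1 = (l.headD (0, 0)).1 := by
  cases l with
  | nil => rfl
  | cons p t => cases p; rfl

theorem Qrun_head (bt : Int → Int → Bool)
    (H1 : ∀ v x a, bt v x = true → bt a x = false → bt v a = true)
    (H2 : ∀ v a b, bt v a = false → bt a b = false → bt v b = false) :
    ∀ (w : List Int) (x : Int),
    ((Qrun bt (x :: w)).headD (0, 0)).1 =
      w.foldl (fun cur y => if bt y cur then y else cur) x := by
  intro w
  induction w with
  | nil => intro x; simp [Qrun, pushRun]
  | cons y ys ih =>
    intro x
    rw [Qrun_cons bt H1 H2]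
    by_cases hcond : ∀ z ∈ y :: ys, bt z x = false
    · rw [if_pos hcond, foldl_pick_id bt _ x hcond]
      rfl
    · rw [if_neg hcond, bump_headD_fst, ih y]
      have hex : ∃ z ∈ y :: ys, bt z x = true := by
        push Not at hcond
        obtain ⟨z, hz, hbt⟩ := hcond
        exact ⟨z, hz, by simpa using hbt⟩
      rw [foldl_pick_switch bt H1 _ x hex]
      rfl

theorem Qrun_tail (bt : Int → Int → Bool)
    (H1 : ∀ v x a, bt v x = true → bt a x = false → bt v a = true)
    (H2 : ∀ v a b, bt v a = false → bt a b = false → bt v b = false) :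
    ∀ (w : List Int) (x : Int), decHead (Qrun bt (x :: w)) = Qrun bt w := by
  intro w x
  rw [Qrun_cons bt H1 H2]
  by_cases hcond : ∀ z ∈ w, bt z x = false
  · rw [if_pos hcond]; simp [decHead]
  · rw [if_neg hcond]
    have hw : w ≠ [] := by rintro rfl; exact hcond (by simp)
    obtain ⟨a, k, t, hQ⟩ : ∃ a k t, Qrun bt w = (a, k) :: t := by
      cases h : Qrun bt w with
      | nil => exact absurd h (Qrun_ne_nil bt w hw)
      | cons p t => exact ⟨p.1, p.2, t, by cases p; simp_all⟩
    have hk : (1:Int) ≤ k := Qrun_counts bt H2 w (a, k) (by simp [hQ])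
    rw [hQ]
    simp only [bump, decHead]
    rw [if_neg (by omega)]
    simp

-- ---- instantiating the two queues ----

theorem btMin_H1 : ∀ v x a, btMin v x = true → btMin a x = false → btMin v a = true := by
  intro v x a h1 h2; simp [btMin] at *; omega

theorem btMin_H2 : ∀ v a b, btMin v a = false → btMin a b = false → btMin v b = false := by
  intro v a b h1 h2; simp [btMin] at *; omega

theorem btMax_H1 : ∀ v x a, btMax v x = true → btMax a x = false → btMax v a = true := by
  intro v x a h1 h2; simp [btMax] at *; omega

theorem btMax_H2 : ∀ v a b, btMax v a = false → btMax a b = false → btMax v b = false := by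
  intro v a b h1 h2; simp [btMax] at *; omega

def mkQ (w : List Int) : MQ := w.foldl MQ.append MQ.empty

-- min()/max() of a nonempty Python list, as the seed-and-fold loop
def fmList : List Int → Int
  | [] => 0
  | x :: xs => xs.foldl min x

def fMList : List Int → Int
  | [] => 0
  | x :: xs => xs.foldl max x

theorem mkQ_eq (w : List Int) : mkQ w = ⟨Qrun btMax w, Qrun btMin w, w⟩ := by
  suffices h : ∀ (q : MQ) (w : List Int), w.foldl MQ.append q =
      ⟨w.foldl (fun l x => (pushRun btMax x l.reverse 1).reverse) q.maxQ,
       w.foldl (fun l x => (pushRun btMin x l.reverse 1).reverse) q.minQ,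
       w.foldl (fun l x => l ++ [x]) q.raw⟩ by
    rw [mkQ, h MQ.empty w]
    simp only [MQ.empty]
    rw [show List.foldl (fun l x => l ++ [x]) ([] : List Int) w = w from by
      simpa using PySem.List.foldl_append_singleton w []]
    rfl
  intro q w
  induction w generalizing q with
  | nil => simp
  | cons x xs ih => simp only [List.foldl_cons, ih]; rfl

theorem mkQ_append (w : List Int) (v : Int) : mkQ (w ++ [v]) = (mkQ w).append v := by
  simp [mkQ]

theorem mkQ_popleft (w : List Int) (x : Int) : (mkQ (x :: w)).popleft = mkQ w := by
  rw [mkQ_eq (x :: w), mkQ_eq w]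
  simp only [MQ.popleft]
  rw [Qrun_tail btMax btMax_H1 btMax_H2, Qrun_tail btMin btMin_H1 btMin_H2]
  rfl

theorem pick_min (xs : List Int) (x : Int) :
    xs.foldl (fun cur y => if btMin y cur then y else cur) x = xs.foldl min x := by
  induction xs generalizing x with
  | nil => rfl
  | cons y ys ih =>
    simp only [List.foldl_cons, ih]
    congr 1
    simp [btMin, min_def]
    omega

theorem pick_max (xs : List Int) (x : Int) :
    xs.foldl (fun cur y => if btMax y cur then y else cur) x = xs.foldl max x := by
  induction xs generalizing x with
  | nil => rfl
  | cons y ys ih =>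
    simp only [List.foldl_cons, ih]
    congr 1
    simp [btMax, max_def]
    omega

theorem mkQ_minv (w : List Int) (x : Int) : (mkQ (x :: w)).minv = fmList (x :: w) := by
  rw [mkQ_eq]
  simp only [MQ.minv, fmList]
  rw [Qrun_head btMin btMin_H1 btMin_H2 w x, pick_min]

theorem mkQ_maxv (w : List Int) (x : Int) : (mkQ (x :: w)).maxv = fMList (x :: w) := by
  rw [mkQ_eq]
  simp only [MQ.maxv, fMList]
  rw [Qrun_head btMax btMax_H1 btMax_H2 w x, pick_max]

-- ---- matrix-level specification values ----

def entM (matrix : List (List Int)) (r c : Nat) : Int := (matrix.getD r []).getD c 0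

def colSeg (matrix : List (List Int)) (R r0 c : Nat) : List Int :=
  (List.range R).map (fun i => entM matrix (r0 + i) c)

def colMin (matrix : List (List Int)) (R r0 c : Nat) : Int := fmList (colSeg matrix R r0 c)
def colMax (matrix : List (List Int)) (R r0 c : Nat) : Int := fMList (colSeg matrix R r0 c)

def rowResSpec (matrix : List (List Int)) (R C m r0 : Nat) : List (Int × Int) :=
  (List.range (m - C + 1)).map (fun c =>
    (fmList ((List.range C).map (fun j => colMin matrix R r0 (c + j))),
     fMList ((List.range C).map (fun j => colMax matrix R r0 (c + j)))))

def resSpec (matrix : List (List Int)) (R C n m : Nat) : List (Int × Int) :=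
  (List.range (n - R + 1)).flatMap (rowResSpec matrix R C m)

theorem colSeg_shift (matrix : List (List Int)) (R r0 c : Nat) :
    colSeg matrix R r0 c ++ [entM matrix (r0 + R) c] = entM matrix r0 c :: colSeg matrix R (r0 + 1) c := by
  have h1 : colSeg matrix R r0 c ++ [entM matrix (r0 + R) c] =
      (List.range (R + 1)).map (fun i => entM matrix (r0 + i) c) := by
    rw [List.range_succ, List.map_append, colSeg]
    rfl
  rw [h1, List.range_succ_eq_map, List.map_cons, List.map_map]
  simp only [colSeg]
  refine congrArg₂ _ (by simp) (List.map_congr_left ?_)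
  intro i _
  simp only [Function.comp_apply, Nat.succ_eq_add_one]
  rw [show r0 + (i + 1) = r0 + 1 + i from by omega]

-- ---- pointwise update folds (the `for c: cols[c] = …` loops) ----

theorem foldl_set_nodup (g : Nat → MQ → MQ) :
    ∀ (l : List Nat), l.Nodup → ∀ (cs : List MQ), (∀ c ∈ l, c < cs.length) →
      (l.foldl (fun cs c => cs.set c (g c (cs.getD c MQ.empty))) cs).length = cs.length ∧
      ∀ j : Nat, (l.foldl (fun cs c => cs.set c (g c (cs.getD c MQ.empty))) cs).getD j MQ.empty =
        if j ∈ l then g j (cs.getD j MQ.empty) else cs.getD j MQ.empty := by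
  intro l
  induction l with
  | nil => intro _ cs _; simp
  | cons c l' ih =>
    intro hnd cs hb
    have hc : c < cs.length := hb c (by simp)
    have hnd' := List.nodup_cons.mp hnd
    have hb' : ∀ d ∈ l', d < (cs.set c (g c (cs.getD c MQ.empty))).length := by
      intro d hd; rw [List.length_set]; exact hb d (by simp [hd])
    have hgd : ∀ j : Nat, (cs.set c (g c (cs.getD c MQ.empty))).getD j MQ.empty =
        if j = c then g c (cs.getD c MQ.empty) else cs.getD j MQ.empty := by
      intro j
      by_cases hj : j = c
      · subst hj
        rw [List.getD, List.getElem?_set_self hc, if_pos rfl]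
        rfl
      · rw [List.getD, List.getElem?_set_ne (Ne.symm hj), if_neg hj]
        rfl
    obtain ⟨hlen, hget⟩ := ih hnd'.2 (cs.set c (g c (cs.getD c MQ.empty))) hb'
    constructor
    · simp only [List.foldl_cons, hlen, List.length_set]
    · intro j
      simp only [List.foldl_cons, hget j, hgd j]
      by_cases hjl : j ∈ l'
      · have hjc : j ≠ c := fun h => hnd'.1 (h ▸ hjl)
        simp [hjl, hjc]
      · by_cases hjc : j = c
        · subst hjc
          simp [hjl]
        · simp [hjl, hjc]

theorem foldl_set_range (g : Nat → MQ → MQ) (m : Nat) (cs : List MQ) (hlen : cs.length = m) :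
    ((List.range m).foldl (fun cs c => cs.set c (g c (cs.getD c MQ.empty))) cs).length = m ∧
    ∀ j, j < m → ((List.range m).foldl (fun cs c => cs.set c (g c (cs.getD c MQ.empty))) cs).getD j MQ.empty =
      g j (cs.getD j MQ.empty) := by
  obtain ⟨h1, h2⟩ := foldl_set_nodup g (List.range m) (List.nodup_range)
    cs (by intro c hc; rw [hlen]; exact List.mem_range.mp hc)
  refine ⟨by rw [h1, hlen], ?_⟩
  intro j hj
  rw [h2 j, if_pos (List.mem_range.mpr hj)]

-- ---- min/max of nonempty lists ----

theorem fm_le (l : List Int) : ∀ y ∈ l, fmList l ≤ y := by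
  cases l with
  | nil => simp
  | cons x t =>
    intro y hy
    rcases List.mem_cons.mp hy with rfl | hy
    · exact (PySem.List.foldl_min_le t y).1
    · exact (PySem.List.foldl_min_le t x).2 y hy

theorem fm_mem (l : List Int) (h : l ≠ []) : fmList l ∈ l := by
  cases l with
  | nil => exact absurd rfl h
  | cons x t =>
    rcases PySem.List.foldl_min_mem t x with h | h
    · simp [fmList, h]
    · simp [fmList, h]

theorem fM_ge (l : List Int) : ∀ y ∈ l, y ≤ fMList l := by
  cases l with
  | nil => simp
  | cons x t =>
    intro y hy
    rcases List.mem_cons.mp hy with rfl | hy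
    · exact (PySem.List.le_foldl_max t y).1
    · exact (PySem.List.le_foldl_max t x).2 y hy

theorem fM_mem (l : List Int) (h : l ≠ []) : fMList l ∈ l := by
  cases l with
  | nil => exact absurd rfl h
  | cons x t =>
    rcases PySem.List.foldl_max_mem t x with h | h
    · simp [fMList, h]
    · simp [fMList, h]

theorem mkQ_minv' (l : List Int) (h : l ≠ []) : (mkQ l).minv = fmList l := by
  cases l with
  | nil => exact absurd rfl h
  | cons x t => exact mkQ_minv t x

theorem mkQ_maxv' (l : List Int) (h : l ≠ []) : (mkQ l).maxv = fMList l := by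
  cases l with
  | nil => exact absurd rfl h
  | cons x t => exact mkQ_maxv t x

theorem mkQ_popleft' (l : List Int) (h : l ≠ []) : (mkQ l).popleft = mkQ l.tail := by
  cases l with
  | nil => exact absurd rfl h
  | cons x t => exact mkQ_popleft t x

theorem colSeg_length (matrix : List (List Int)) (R r0 c : Nat) : (colSeg matrix R r0 c).length = R := by
  simp [colSeg]

theorem colSeg_ne_nil (matrix : List (List Int)) (R r0 c : Nat) (hR : 1 ≤ R) :
    colSeg matrix R r0 c ≠ [] := by
  intro h
  have := colSeg_length matrix R r0 c
  rw [h] at this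
  simp at this
  omega

theorem slice_map_range (f : Nat → Int) (m k c : Nat) (hk : k ≤ m) (hck : c ≤ k) :
    (((List.range m).map f).take k).drop c = (List.range (k - c)).map (fun j => f (c + j)) := by
  apply List.ext_getElem
  · simp; omega
  · intro i h1 h2
    simp only [List.getElem_drop, List.getElem_take, List.getElem_map, List.getElem_range]

-- one row of A's outer loop: the two MonoQueues sweeping over the per-column minima/maxima
theorem inner_loop_aux (matrix : List (List Int)) (R C m r0 : Nat)
    (hR : 1 ≤ R) (hC : 1 ≤ C) (hCm : C ≤ m)
    (cols : List MQ) (hcols : ∀ c, c < m → cols.getD c MQ.empty = mkQ (colSeg matrix R r0 c))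
    (res0 : List (Int × Int)) :
    ∀ k, k ≤ m →
    (List.range k).foldl (fun (s : MQ × MQ × List (Int × Int)) c =>
        let w1 := s.1.append (cols.getD c MQ.empty).minv
        let w2 := s.2.1.append (cols.getD c MQ.empty).maxv
        if C - 1 ≤ c then (w1.popleft, w2.popleft, s.2.2 ++ [(w1.minv, w2.maxv)])
        else (w1, w2, s.2.2)) (MQ.empty, MQ.empty, res0) =
      (mkQ ((((List.range m).map (colMin matrix R r0)).take k).drop (k - (C - 1))),
       mkQ ((((List.range m).map (colMax matrix R r0)).take k).drop (k - (C - 1))),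
       res0 ++ (rowResSpec matrix R C m r0).take (k + 1 - C)) := by
  intro k
  induction k with
  | zero =>
    intro _
    rw [show 0 + 1 - C = 0 from by omega]
    simp [mkQ]
  | succ k ih =>
    intro hk1
    have hk : k < m := hk1
    rw [List.range_succ, List.foldl_append, ih (by omega), List.foldl_cons, List.foldl_nil]
    have hminv : (mkQ (colSeg matrix R r0 k)).minv = colMin matrix R r0 k :=
      mkQ_minv' _ (colSeg_ne_nil matrix R r0 k hR)
    have hmaxv : (mkQ (colSeg matrix R r0 k)).maxv = colMax matrix R r0 k :=
      mkQ_maxv' _ (colSeg_ne_nil matrix R r0 k hR)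
    simp only [hcols k hk, hminv, hmaxv]
    have htake : ∀ f : Nat → Int,
        ((List.range m).map f).take (k + 1) = ((List.range m).map f).take k ++ [f k] := by
      intro f
      rw [List.take_add_one]
      congr
      rw [List.getElem?_map, List.getElem?_range hk]
      rfl
    have hstep : ∀ f : Nat → Int,
        (mkQ ((((List.range m).map f).take k).drop (k - (C - 1)))).append (f k)
          = mkQ ((((List.range m).map f).take (k + 1)).drop (k - (C - 1))) := by
      intro f
      rw [← mkQ_append, htake f, List.drop_append_of_le_length (by
        rw [List.length_take, List.length_map, List.length_range]; omega)]
    rw [hstep (colMin matrix R r0), hstep (colMax matrix R r0)]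
    by_cases hg : C - 1 ≤ k
    · rw [if_pos hg]
      have he1 : k - (C - 1) = k + 1 - C := by omega
      rw [he1]
      have hlen : ∀ f : Nat → Int,
          ((((List.range m).map f).take (k + 1)).drop (k + 1 - C)).length = C := by
        intro f
        rw [List.length_drop, List.length_take, List.length_map, List.length_range]
        omega
      have hne : ∀ f : Nat → Int,
          ((((List.range m).map f).take (k + 1)).drop (k + 1 - C)) ≠ [] := by
        intro f h
        have := hlen f
        rw [h] at this
        simp at this
        omega
      have hsl : ∀ f : Nat → Int,
          ((((List.range m).map f).take (k + 1)).drop (k + 1 - C))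
            = (List.range C).map (fun j => f (k + 1 - C + j)) := by
        intro f
        rw [slice_map_range f m (k + 1) (k + 1 - C) (by omega) (by omega),
          show k + 1 - (k + 1 - C) = C from by omega]
      refine Prod.ext ?_ (Prod.ext ?_ ?_)
      · show (mkQ _).popleft = _
        rw [mkQ_popleft' _ (hne _), List.tail_drop]
        rw [show k + 1 - C + 1 = k + 1 - (C - 1) from by omega]
      · show (mkQ _).popleft = _
        rw [mkQ_popleft' _ (hne _), List.tail_drop]
        rw [show k + 1 - C + 1 = k + 1 - (C - 1) from by omega]
      · show (res0 ++ _) ++ [((mkQ _).minv, (mkQ _).maxv)] = _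
        rw [mkQ_minv' _ (hne _), mkQ_maxv' _ (hne _), hsl (colMin matrix R r0),
          hsl (colMax matrix R r0), List.append_assoc]
        congr 1
        rw [show k + 1 + 1 - C = (k + 1 - C) + 1 from by omega, List.take_add_one]
        congr 1
        rw [rowResSpec, List.getElem?_map, List.getElem?_range (by omega : k + 1 - C < m - C + 1)]
        rfl
    · rw [if_neg hg]
      rw [show k - (C - 1) = 0 from by omega, show k + 1 - (C - 1) = 0 from by omega,
        show k + 1 - C = 0 from by omega, show k + 1 + 1 - C = 0 from by omega]

theorem inner_loop (matrix : List (List Int)) (R C m r0 : Nat)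
    (hR : 1 ≤ R) (hC : 1 ≤ C) (hCm : C ≤ m)
    (cols : List MQ) (hcols : ∀ c, c < m → cols.getD c MQ.empty = mkQ (colSeg matrix R r0 c))
    (res0 : List (Int × Int)) :
    ((List.range m).foldl (fun (s : MQ × MQ × List (Int × Int)) c =>
        let w1 := s.1.append (cols.getD c MQ.empty).minv
        let w2 := s.2.1.append (cols.getD c MQ.empty).maxv
        if C - 1 ≤ c then (w1.popleft, w2.popleft, s.2.2 ++ [(w1.minv, w2.maxv)])
        else (w1, w2, s.2.2)) (MQ.empty, MQ.empty, res0)).2.2 =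
      res0 ++ rowResSpec matrix R C m r0 := by
  rw [inner_loop_aux matrix R C m r0 hR hC hCm cols hcols res0 m (le_refl m)]
  show res0 ++ _ = _
  congr 1
  apply List.take_of_length_le
  rw [rowResSpec, List.length_map, List.length_range]
  omega

theorem init_loop (matrix : List (List Int)) (m : Nat) :
    ∀ R : Nat,
    ((List.range R).foldl (fun cs r => (List.range m).foldl
        (fun cs2 c => cs2.set c ((cs2.getD c MQ.empty).append (entM matrix r c))) cs)
      (List.replicate m MQ.empty)).length = m ∧
    ∀ c, c < m →
      ((List.range R).foldl (fun cs r => (List.range m).foldl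
          (fun cs2 c => cs2.set c ((cs2.getD c MQ.empty).append (entM matrix r c))) cs)
        (List.replicate m MQ.empty)).getD c MQ.empty = mkQ (colSeg matrix R 0 c) := by
  intro R
  induction R with
  | zero =>
    refine ⟨by simp, ?_⟩
    intro c hc
    simp only [List.range_zero, List.foldl_nil, List.getD, List.getElem?_replicate, if_pos hc]
    simp [colSeg, mkQ]
  | succ R ih =>
    obtain ⟨hlen, hget⟩ := ih
    rw [List.range_succ, List.foldl_append, List.foldl_cons, List.foldl_nil]
    obtain ⟨hlen2, hget2⟩ := foldl_set_range
      (fun c q => q.append (entM matrix R c)) m _ hlen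
    refine ⟨hlen2, ?_⟩
    intro c hc
    rw [hget2 c hc, hget c hc, ← mkQ_append]
    congr 1
    rw [show colSeg matrix (R + 1) 0 c = (List.range (R + 1)).map (fun i => entM matrix (0 + i) c) from rfl,
      List.range_succ, List.map_append]
    simp [colSeg]

theorem update_loop (matrix : List (List Int)) (R m r0 : Nat)
    (cols : List MQ) (hlen : cols.length = m)
    (hcols : ∀ c, c < m → cols.getD c MQ.empty = mkQ (colSeg matrix R r0 c)) :
    ((List.range m).foldl (fun cs c =>
        cs.set c (((cs.getD c MQ.empty).append (entM matrix (r0 + R) c)).popleft)) cols).length = m ∧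
    ∀ c, c < m →
      ((List.range m).foldl (fun cs c =>
          cs.set c (((cs.getD c MQ.empty).append (entM matrix (r0 + R) c)).popleft)) cols).getD c MQ.empty
        = mkQ (colSeg matrix R (r0 + 1) c) := by
  obtain ⟨hlen2, hget2⟩ := foldl_set_range
    (fun c q => ((q.append (entM matrix (r0 + R) c)).popleft)) m cols hlen
  refine ⟨hlen2, ?_⟩
  intro c hc
  rw [hget2 c hc, hcols c hc, ← mkQ_append, colSeg_shift,
    mkQ_popleft' _ (by simp), List.tail_cons]

theorem outer_loop (matrix : List (List Int)) (R C n m : Nat)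
    (hR : 1 ≤ R) (hRn : R ≤ n) (hC : 1 ≤ C) (hCm : C ≤ m)
    (cols0 : List MQ) (hlen0 : cols0.length = m)
    (hcols0 : ∀ c, c < m → cols0.getD c MQ.empty = mkQ (colSeg matrix R 0 c)) :
    ∀ K, K ≤ n - R + 1 →
    ((List.range K).foldl (fun (st : List MQ × List (Int × Int)) r =>
        ((if r + R < n then
            (List.range m).foldl (fun cs c =>
              cs.set c (((cs.getD c MQ.empty).append (entM matrix (r + R) c)).popleft)) st.1
          else st.1),
         ((List.range m).foldl (fun (s : MQ × MQ × List (Int × Int)) c =>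
            let w1 := s.1.append (st.1.getD c MQ.empty).minv
            let w2 := s.2.1.append (st.1.getD c MQ.empty).maxv
            if C - 1 ≤ c then (w1.popleft, w2.popleft, s.2.2 ++ [(w1.minv, w2.maxv)])
            else (w1, w2, s.2.2)) (MQ.empty, MQ.empty, st.2)).2.2)) (cols0, [])).1.length = m ∧
    (∀ c, c < m →
      ((List.range K).foldl (fun (st : List MQ × List (Int × Int)) r =>
        ((if r + R < n then
            (List.range m).foldl (fun cs c =>
              cs.set c (((cs.getD c MQ.empty).append (entM matrix (r + R) c)).popleft)) st.1
          else st.1),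
         ((List.range m).foldl (fun (s : MQ × MQ × List (Int × Int)) c =>
            let w1 := s.1.append (st.1.getD c MQ.empty).minv
            let w2 := s.2.1.append (st.1.getD c MQ.empty).maxv
            if C - 1 ≤ c then (w1.popleft, w2.popleft, s.2.2 ++ [(w1.minv, w2.maxv)])
            else (w1, w2, s.2.2)) (MQ.empty, MQ.empty, st.2)).2.2)) (cols0, [])).1.getD c MQ.empty
        = mkQ (colSeg matrix R (min K (n - R)) c)) ∧
    ((List.range K).foldl (fun (st : List MQ × List (Int × Int)) r =>
        ((if r + R < n then
            (List.range m).foldl (fun cs c =>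
              cs.set c (((cs.getD c MQ.empty).append (entM matrix (r + R) c)).popleft)) st.1
          else st.1),
         ((List.range m).foldl (fun (s : MQ × MQ × List (Int × Int)) c =>
            let w1 := s.1.append (st.1.getD c MQ.empty).minv
            let w2 := s.2.1.append (st.1.getD c MQ.empty).maxv
            if C - 1 ≤ c then (w1.popleft, w2.popleft, s.2.2 ++ [(w1.minv, w2.maxv)])
            else (w1, w2, s.2.2)) (MQ.empty, MQ.empty, st.2)).2.2)) (cols0, [])).2
      = (List.range K).flatMap (rowResSpec matrix R C m) := by
  intro K
  induction K with
  | zero =>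
    intro _
    refine ⟨hlen0, ?_, by simp⟩
    intro c hc
    simpa using hcols0 c hc
  | succ K ih =>
    intro hK1
    have hK : K ≤ n - R := by omega
    obtain ⟨hlen, hcols, hres⟩ := ih (by omega)
    have hminK : min K (n - R) = K := by omega
    rw [hminK] at hcols
    rw [List.range_succ, List.foldl_append, List.foldl_cons, List.foldl_nil]
    refine ⟨?_, ?_, ?_⟩
    · by_cases hgd : K + R < n
      · rw [if_pos hgd]
        exact (update_loop matrix R m K _ hlen hcols).1
      · rw [if_neg hgd]
        exact hlen
    · intro c hc
      by_cases hgd : K + R < n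
      · rw [if_pos hgd, (update_loop matrix R m K _ hlen hcols).2 c hc,
          show min (K + 1) (n - R) = K + 1 from by omega]
      · rw [if_neg hgd, hcols c hc, show min (K + 1) (n - R) = K from by omega]
    · rw [inner_loop matrix R C m K hR hC hCm _ hcols, hres]
      simp [List.flatMap_append]

def winFlat (matrix : List (List Int)) (R C r0 c : Nat) : List Int :=
  (List.range R).flatMap (fun i => (List.range C).map (fun j => entM matrix (r0 + i) (c + j)))

theorem winFlat_ne_nil (matrix : List (List Int)) (R C r0 c : Nat) (hR : 1 ≤ R) (hC : 1 ≤ C) :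
    winFlat matrix R C r0 c ≠ [] := by
  apply List.ne_nil_of_mem (a := entM matrix (r0 + 0) (c + 0))
  rw [winFlat, List.mem_flatMap]
  exact ⟨0, List.mem_range.mpr (by omega), List.mem_map.mpr ⟨0, List.mem_range.mpr (by omega), rfl⟩⟩

theorem mem_winFlat (matrix : List (List Int)) (R C r0 c i j : Nat) (hi : i < R) (hj : j < C) :
    entM matrix (r0 + i) (c + j) ∈ winFlat matrix R C r0 c := by
  rw [winFlat, List.mem_flatMap]
  exact ⟨i, List.mem_range.mpr hi, List.mem_map.mpr ⟨j, List.mem_range.mpr hj, rfl⟩⟩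

theorem win_min (matrix : List (List Int)) (R C r0 c : Nat) (hR : 1 ≤ R) (hC : 1 ≤ C) :
    fmList ((List.range C).map (fun j => colMin matrix R r0 (c + j))) = fmList (winFlat matrix R C r0 c) := by
  apply le_antisymm
  · obtain ⟨i, hi, hmem2⟩ := List.mem_flatMap.mp (by
      simpa only [winFlat] using fm_mem _ (winFlat_ne_nil matrix R C r0 c hR hC))
    obtain ⟨j, hj, hval⟩ := List.mem_map.mp hmem2
    rw [winFlat, ← hval]
    calc fmList ((List.range C).map (fun j => colMin matrix R r0 (c + j)))
        ≤ colMin matrix R r0 (c + j) := fm_le _ _ (List.mem_map.mpr ⟨j, hj, rfl⟩)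
      _ ≤ entM matrix (r0 + i) (c + j) := fm_le _ _ (by
          rw [colSeg, List.mem_map]
          exact ⟨i, hi, rfl⟩)
  · have hmem := fm_mem ((List.range C).map (fun j => colMin matrix R r0 (c + j))) (by
      apply List.ne_nil_of_mem (a := colMin matrix R r0 (c + 0))
      exact List.mem_map.mpr ⟨0, List.mem_range.mpr (by omega), rfl⟩)
    obtain ⟨j, hj, hval⟩ := List.mem_map.mp hmem
    rw [← hval]
    have hcolmem := fm_mem _ (colSeg_ne_nil matrix R r0 (c + j) hR)
    rw [colSeg, List.mem_map] at hcolmem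
    obtain ⟨i, hi, hival⟩ := hcolmem
    show fmList (winFlat matrix R C r0 c) ≤ colMin matrix R r0 (c + j)
    calc fmList (winFlat matrix R C r0 c)
        ≤ entM matrix (r0 + i) (c + j) :=
          fm_le _ _ (mem_winFlat matrix R C r0 c i j (List.mem_range.mp hi) (List.mem_range.mp hj))
      _ = colMin matrix R r0 (c + j) := hival

theorem win_max (matrix : List (List Int)) (R C r0 c : Nat) (hR : 1 ≤ R) (hC : 1 ≤ C) :
    fMList ((List.range C).map (fun j => colMax matrix R r0 (c + j))) = fMList (winFlat matrix R C r0 c) := by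
  apply le_antisymm
  · have hmem := fM_mem ((List.range C).map (fun j => colMax matrix R r0 (c + j))) (by
      apply List.ne_nil_of_mem (a := colMax matrix R r0 (c + 0))
      exact List.mem_map.mpr ⟨0, List.mem_range.mpr (by omega), rfl⟩)
    obtain ⟨j, hj, hval⟩ := List.mem_map.mp hmem
    rw [← hval]
    have hcolmem := fM_mem _ (colSeg_ne_nil matrix R r0 (c + j) hR)
    rw [colSeg, List.mem_map] at hcolmem
    obtain ⟨i, hi, hival⟩ := hcolmem
    show colMax matrix R r0 (c + j) ≤ fMList (winFlat matrix R C r0 c)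
    calc colMax matrix R r0 (c + j) = entM matrix (r0 + i) (c + j) := hival.symm
      _ ≤ fMList (winFlat matrix R C r0 c) :=
          fM_ge _ _ (mem_winFlat matrix R C r0 c i j (List.mem_range.mp hi) (List.mem_range.mp hj))
  · obtain ⟨i, hi, hmem2⟩ := List.mem_flatMap.mp (by
      simpa only [winFlat] using fM_mem _ (winFlat_ne_nil matrix R C r0 c hR hC))
    obtain ⟨j, hj, hval⟩ := List.mem_map.mp hmem2
    rw [winFlat, ← hval]
    calc entM matrix (r0 + i) (c + j)
        ≤ colMax matrix R r0 (c + j) := fM_ge _ _ (by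
          rw [colSeg, List.mem_map]
          exact ⟨i, hi, rfl⟩)
      _ ≤ fMList ((List.range C).map (fun j => colMax matrix R r0 (c + j))) :=
          fM_ge _ _ (List.mem_map.mpr ⟨j, hj, rfl⟩)

theorem resSpec_ne_nil (matrix : List (List Int)) (R C n m : Nat) :
    resSpec matrix R C n m ≠ [] := by
  have h1 : rowResSpec matrix R C m 0 ≠ [] := by
    intro h
    have : (rowResSpec matrix R C m 0).length = m - C + 1 := by
      rw [rowResSpec, List.length_map, List.length_range]
    rw [h] at this
    simp at this
  obtain ⟨p, hp⟩ := List.exists_mem_of_ne_nil _ h1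
  apply List.ne_nil_of_mem (a := p)
  rw [resSpec, List.mem_flatMap]
  exact ⟨0, List.mem_range.mpr (by omega), hp⟩

def finishA (res : List (Int × Int)) : Int :=
  match res with
  | [] => 0
  | p :: ps => ps.foldl (fun mn q => min mn (q.2 - q.1)) (p.2 - p.1)

theorem bridgeA (matrix : List (List Int)) (R C : Nat)
    (hR1 : 1 ≤ R) (hRn : R ≤ matrix.length) (hC1 : 1 ≤ C) (hCm : C ≤ (matrix.headD []).length)
    (hrect : ∀ k, k < matrix.length → (matrix.getD k []).length = (matrix.headD []).length) :
    solve matrix (R : Int) (C : Int)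
      = finishA (resSpec matrix R C matrix.length (matrix.headD []).length) := by
  have hcast1 : ((matrix.length : Int) - (R : Int) + 1) = ((matrix.length - R + 1 : Nat) : Int) := by
    omega
  have hguard : ∀ cn : Nat, (((C : Int) - 1 ≤ (cn : Int))) ↔ (C - 1 ≤ cn) := by
    intro cn; omega
  have hcast3 : ∀ kn : Nat, ((kn : Int) + (R : Int)) = ((kn + R : Nat) : Int) := by
    intro kn; omega
  simp only [solve, hcast1, PySem.List.pyRange_zero_natCast, List.foldl_map,
    PySem.List.enumerate_eq_map_pyRange _ (0 : Int), PySem.List.len_eq, hcast3,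
    PySem.List.pyGetD_natCast, PySem.List.pySetD_natCast, hguard, Nat.cast_lt]
  have hent : ∀ (r c : Nat), ((matrix.getD r []).getD c 0) = entM matrix r c := fun _ _ => rfl
  simp only [hent]
  have hinit_fix : (List.foldl (fun cs r => List.foldl
        (fun cs2 c => cs2.set c ((cs2.getD c MQ.empty).append (entM matrix r c))) cs
        (List.range (matrix.getD r []).length))
      (List.replicate (matrix.headD []).length MQ.empty) (List.range R))
      = (List.foldl (fun cs r => List.foldl
          (fun cs2 c => cs2.set c ((cs2.getD c MQ.empty).append (entM matrix r c))) cs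
          (List.range (matrix.headD []).length))
        (List.replicate (matrix.headD []).length MQ.empty) (List.range R)) := by
    apply PySem.List.foldl_congr_mem
    intro acc r hr
    rw [hrect r (by have := List.mem_range.mp hr; omega)]
  rw [hinit_fix]
  obtain ⟨hinitlen, hinitget⟩ := init_loop matrix (matrix.headD []).length R
  have houter := outer_loop matrix R C matrix.length (matrix.headD []).length
    hR1 hRn hC1 hCm _ hinitlen hinitget (matrix.length - R + 1) le_rfl
  rw [houter.2.2]
  rfl

theorem bridgeB (matrix : List (List Int)) (R C : Nat)
    (hR1 : 1 ≤ R) (hRn : R ≤ matrix.length) (hC1 : 1 ≤ C) (hCm : C ≤ (matrix.headD []).length) :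
    solve_alt matrix (R : Int) (C : Int)
      = (PySem.List.min? ((List.range (matrix.length - R + 1)).flatMap (fun r0 =>
          (List.range ((matrix.headD []).length - C + 1)).map (fun c =>
            fMList (winFlat matrix R C r0 c) - fmList (winFlat matrix R C r0 c))))
          (fun y => y)).getD 0 := by
  have hcast1 : ((matrix.length : Int) - (R : Int) + 1) = ((matrix.length - R + 1 : Nat) : Int) := by
    omega
  have hcast2 : (((matrix.headD []).length : Int) - (C : Int) + 1)
      = (((matrix.headD []).length - C + 1 : Nat) : Int) := by omega
  have hadd : ∀ a b : Nat, ((a : Int) + (b : Int)) = ((a + b : Nat) : Int) := by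
    intro a b; omega
  have hent : ∀ (r c : Nat), ((matrix.getD r []).getD c 0) = entM matrix r c := fun _ _ => rfl
  have hmax : ∀ r c : Nat, (PySem.List.max? (winFlat matrix R C r c) (fun y => y)).getD 0
      = fMList (winFlat matrix R C r c) := by
    intro r c
    cases h : winFlat matrix R C r c with
    | nil => exact absurd h (winFlat_ne_nil matrix R C r c hR1 hC1)
    | cons x t => rw [PySem.List.max?_id_cons]; rfl
  have hmin : ∀ r c : Nat, (PySem.List.min? (winFlat matrix R C r c) (fun y => y)).getD 0
      = fmList (winFlat matrix R C r c) := by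
    intro r c
    cases h : winFlat matrix R C r c with
    | nil => exact absurd h (winFlat_ne_nil matrix R C r c hR1 hC1)
    | cons x t => rw [PySem.List.min?_id_cons]; rfl
  simp only [solve_alt, hcast1, hcast2, PySem.List.pyRange_zero_natCast, List.foldl_map,
    PySem.List.foldl_append_singleton_eq_map, PySem.List.foldl_append_eq_flatMap,
    List.flatMap_map, List.map_map, Function.comp_def, hadd, PySem.List.pyGetD_natCast,
    hent, List.nil_append]
  have hwin : ∀ r c : Nat, (List.range R).flatMap (fun i =>
      (List.range C).map (fun j => entM matrix (r + i) (c + j))) = winFlat matrix R C r c :=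
    fun _ _ => rfl
  simp only [hwin, hmax, hmin]

theorem finishA_eq_min (res : List (Int × Int)) (hres : res ≠ []) :
    finishA res = (PySem.List.min? (res.map (fun p => p.2 - p.1)) (fun y => y)).getD 0 := by
  cases res with
  | nil => exact absurd rfl hres
  | cons p ps =>
    rw [List.map_cons, PySem.List.min?_id_cons, Option.getD_some, List.foldl_map]
    rfl

theorem diffs_eq (matrix : List (List Int)) (R C n m : Nat) (hR1 : 1 ≤ R) (hC1 : 1 ≤ C) :
    (List.range (n - R + 1)).flatMap (fun r0 => (List.range (m - C + 1)).map (fun c =>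
        fMList (winFlat matrix R C r0 c) - fmList (winFlat matrix R C r0 c)))
      = (resSpec matrix R C n m).map (fun p => p.2 - p.1) := by
  rw [resSpec, List.map_flatMap]
  congr 1
  funext r0
  rw [rowResSpec, List.map_map]
  apply List.map_congr_left
  intro c _
  simp only [Function.comp_apply]
  rw [win_min matrix R C r0 c hR1 hC1, win_max matrix R C r0 c hR1 hC1]

-- ===== VERDICT (by name: the statement is the Claim_ definition above) =====
theorem solve_spec : Claim_equal_solve := by
  intro matrix rowSize colSize _ hpre
  show solve matrix rowSize colSize = solve_alt matrix rowSize colSize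
  obtain ⟨hne, hrect, h1R, hRn, h1C, hCm⟩ := hpre
  have hR' : rowSize = ((rowSize.toNat : Nat) : Int) := by omega
  have hC' : colSize = ((colSize.toNat : Nat) : Int) := by omega
  rw [hR', hC']
  have hR1 : 1 ≤ rowSize.toNat := by omega
  have hRn' : rowSize.toNat ≤ matrix.length := by omega
  have hC1 : 1 ≤ colSize.toNat := by omega
  have hCm' : colSize.toNat ≤ (matrix.headD []).length := by omega
  have hrect' : ∀ k, k < matrix.length → (matrix.getD k []).length = (matrix.headD []).length := by
    intro k hk
    have hmem : matrix.getD k [] ∈ matrix := by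
      rw [List.getD_eq_getElem?_getD, List.getElem?_eq_getElem hk]
      simp [List.getElem_mem hk]
    exact hrect _ hmem
  rw [bridgeA matrix _ _ hR1 hRn' hC1 hCm' hrect', bridgeB matrix _ _ hR1 hRn' hC1 hCm',
    diffs_eq matrix _ _ matrix.length _ hR1 hC1,
    ← finishA_eq_min _ (resSpec_ne_nil matrix _ _ matrix.length _)]
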